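-- pv_equiv track=rewrite | github.com/prdx33/dotfiles | .config/sketchybar/icons/generate_icons.py | triangle_down
-- ===== SOURCE A (Python) =====
-- def triangle_down(color):
--     """Downward pointing triangle"""
--     pixels = {}
--     pattern = [
--         "##########",
--         "##########",
--         " ######## ",
--         " ######## ",
--         "  ######  ",
--         "  ######  ",
--         "   ####   ",
--         "   ####   ",
--         "    ##    ",
--         "    ##    ",
--     ]
--     for y, row in enumerate(pattern):
--         for x, char in enumerate(row):
--             if char == '#':
--                 pixels[(x, y)] = color
--     return pixels
-- ===== SOURCE B (Python) =====
-- def triangle_down(color):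
--     """Downward pointing triangle"""
--     pixels = {}
--     for y in range(10):
--         i = y // 2
--         for x in range(i, 10 - i):
--             pixels[(x, y)] = color
--     return pixels
-- ===== Notes on version B (the rewrite author's own statement) =====
-- stated objective: simpler
-- what changed: Replaced the hardcoded 10x10 string-pattern scan (enumerate rows, test char == '#') with a closed-form per-row span: for each y, fill x in range(i, 10-i) where i = y//2, eliminating the data table and the character test.
import Mathlib
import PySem

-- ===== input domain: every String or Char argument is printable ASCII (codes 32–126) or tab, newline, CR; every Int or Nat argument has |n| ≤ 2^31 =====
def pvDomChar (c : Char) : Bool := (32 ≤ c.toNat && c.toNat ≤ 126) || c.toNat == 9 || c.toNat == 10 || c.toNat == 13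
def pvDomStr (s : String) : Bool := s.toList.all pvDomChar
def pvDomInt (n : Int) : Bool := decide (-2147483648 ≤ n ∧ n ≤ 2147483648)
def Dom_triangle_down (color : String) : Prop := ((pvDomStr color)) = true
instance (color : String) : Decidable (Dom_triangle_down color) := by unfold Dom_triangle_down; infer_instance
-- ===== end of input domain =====

-- B replaces A's hardcoded 10x10 string pattern with a closed-form per-row span (x in range(i, 10-i), i = y//2): simpler, no data table.


-- ===== PORT A =====
def trianglePattern : List String :=
  [ "##########",
    "##########",
    " ######## ",
    " ######## ",
    "  ######  ",
    "  ######  ",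
    "   ####   ",
    "   ####   ",
    "    ##    ",
    "    ##    " ]

def triangle_down (color : String) : List (Int × Int × String) :=
  (((PySem.List.enumerate trianglePattern 0).foldl
      (fun (d : PySem.Dict (Int × Int) String) yrow =>
        (PySem.List.enumerate yrow.2.toList 0).foldl
          (fun d xc => if xc.2 == '#' then d.insert (xc.1, yrow.1) color else d) d)
      PySem.Dict.empty).items).map (fun p => (p.1.1, p.1.2, p.2))

-- ===== PORT B =====
def triangle_down_alt (color : String) : List (Int × Int × String) :=
  (((PySem.List.pyRange 0 10 1).foldl
      (fun (d : PySem.Dict (Int × Int) String) y =>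
        let i := PySem.Int.floordiv y 2
        (PySem.List.pyRange i (10 - i) 1).foldl (fun d x => d.insert (x, y) color) d)
      PySem.Dict.empty).items).map (fun p => (p.1.1, p.1.2, p.2))

-- ===== PRECONDITION & SPEC =====
def Spec_triangle_down (color : String) (out : List (Int × Int × String)) : Prop := out = triangle_down_alt color
instance (color : String) (out : List (Int × Int × String)) : Decidable (Spec_triangle_down color out) := by unfold Spec_triangle_down; infer_instance

-- ===== CLAIM (what is proved, stated in full; the proofs are below) =====
def Claim_equal_triangle_down : Prop := ∀ (color : String), Dom_triangle_down color → Spec_triangle_down color (triangle_down color)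

-- ===== LEMMAS AND PROOFS =====

-- ===== VERDICT (by name: the statement is the Claim_ definition above) =====
set_option maxRecDepth 40000 in
set_option maxHeartbeats 2000000 in

theorem triangle_down_spec : Claim_equal_triangle_down := by
  intro color _
  unfold Spec_triangle_down
  simp only [triangle_down, triangle_down_alt, trianglePattern]
  simp [PySem.List.enumerate_cons, PySem.List.enumerate_nil, PySem.List.pyRange_one,
        List.range_succ, PySem.Int.floordiv, PySem.Dict.items_insert, PySem.Dict.contains_insert]
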